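-- pv_equiv track=rewrite | github.com/KLiehr/WS2122---Feature-Aggregation-and-Clustering | ProjectApp/add_Attributes/add_D2.py | add_D2
-- ===== SOURCE A (Python) =====
-- def add_D2(log, attr):
--
--     for trace in log:
--         for event in trace:
--             # shortcut to save time, if attribute is assigned in given event
--             if attr in event:
--                 event['Cur'+ attr + 'Value(D2)'] = event[attr]
--             else:
--                 event['Cur'+ attr +'Value(D2)'] = curValue(trace, event, attr)
--
--
--     return log
--
-- def curValue(trace, event, attr):
--
--     # denotes the latest value of the attribute
--     attr_Value = 'NotAssigned'
--     # denotes if we are before the event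
--     before = True
--
--
--     for ev in trace:
--
--         if before:
--             # if the current event has the attribute, update attr_Value
--             if attr in ev:
--                 attr_Value = ev[attr]
--
--         # update before
--         if ev == event:
--             before = False
--
--         # return attr_Value if given event has been reached
--         if not before:
--             return attr_Value
--
--     return attr_Value
-- ===== SOURCE B (Python) =====
-- def add_D2(log, attr):
--     # One forward pass per trace keeping the running last-seen value of attr.
--     # Mutates the events in place and returns log, like the original.
--     key = 'Cur' + attr + 'Value(D2)'
--     for trace in log:
--         cur = 'NotAssigned'
--         for event in trace:
--             if attr in event:
--                 cur = event[attr]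
--             event[key] = cur
--     return log
-- ===== Notes on version B (the rewrite author's own statement) =====
-- stated objective: faster
-- what changed: A recomputes the latest prior attribute value for each event by rescanning the trace from the start (curValue); B makes a single forward pass per trace carrying the running last-seen value, eliminating the inner scan.
import Mathlib
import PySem

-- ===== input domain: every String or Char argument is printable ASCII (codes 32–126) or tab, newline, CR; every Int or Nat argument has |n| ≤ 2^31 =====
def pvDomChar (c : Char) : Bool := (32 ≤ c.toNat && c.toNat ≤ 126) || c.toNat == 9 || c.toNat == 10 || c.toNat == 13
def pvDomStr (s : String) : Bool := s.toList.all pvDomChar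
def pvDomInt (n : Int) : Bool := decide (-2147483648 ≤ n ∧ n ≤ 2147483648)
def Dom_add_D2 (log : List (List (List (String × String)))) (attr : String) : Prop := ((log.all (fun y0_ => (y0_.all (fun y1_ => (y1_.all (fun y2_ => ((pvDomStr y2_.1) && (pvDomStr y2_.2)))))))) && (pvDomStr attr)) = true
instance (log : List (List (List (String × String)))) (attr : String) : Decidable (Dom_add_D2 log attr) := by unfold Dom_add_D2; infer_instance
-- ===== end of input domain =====

-- B replaces A's per-event backward rescan (curValue) by one forward pass per tr_ that
-- tracks the running last-seen attribute value: O(n) per tr_ instead of O(n^2).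
-- Both A and B mutate the events of `log` in place and return it; the theorems are about the return value.

-- ===== PORT A =====

-- Python's `ev == event` on dicts: equal key sets with equal values, insertion order ignored
-- (exact for Python dicts, whose keys are unique).
def pyDictEq (d1 d2 : List (String × String)) : Bool :=
  ((PySem.Dict.mk d1).keys.all
      (fun k => (PySem.Dict.mk d1).get? k == (PySem.Dict.mk d2).get? k)) &&
  ((PySem.Dict.mk d2).keys.all
      (fun k => (PySem.Dict.mk d1).get? k == (PySem.Dict.mk d2).get? k))

-- the loop of curValue: state = (attr_Value, before), with the two early-return tests
def curValueGo (attr : String) (event : List (String × String)) :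
    List (List (String × String)) → String → Bool → String
  | [], av, _ => av
  | ev :: rest, av, before =>
      -- if before: if attr in ev: attr_Value = ev[attr]
      let av' := if before then
                   (match (PySem.Dict.mk ev).get? attr with
                    | some v => v
                    | none => av)
                 else av
      -- if ev == event: before = False
      let before' := if pyDictEq ev event then false else before
      -- if not before: return attr_Value
      if before' then curValueGo attr event rest av' before' else av'

def curValue (tr_ : List (List (String × String))) (event : List (String × String))
    (attr : String) : String :=
  curValueGo attr event tr_ "NotAssigned" true

-- the inner `for event in tr_` loop; `done` is the already-mutated prefix of the tr_,
-- so curValue sees exactly what Python's in-place mutation has produced so far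
def addD2Tr (attr : String) :
    List (List (String × String)) → List (List (String × String)) → List (List (String × String))
  | done, [] => done
  | done, event :: rest =>
      let v := match (PySem.Dict.mk event).get? attr with
               | some w => w                                         -- shortcut branch
               | none => curValue (done ++ event :: rest) event attr -- else branch
      addD2Tr attr
        (done ++ [((PySem.Dict.mk event).insert ("Cur" ++ attr ++ "Value(D2)") v).items]) rest

def add_D2 (log : List (List (List (String × String)))) (attr : String) :
    List (List (List (String × String))) :=
  log.map (fun tr_ => addD2Tr attr [] tr_)

-- ===== PORT B =====
def add_D2_alt (log : List (List (List (String × String)))) (attr : String) :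
    List (List (List (String × String))) :=
  let key := "Cur" ++ attr ++ "Value(D2)"
  log.map (fun tr_ =>
    (tr_.foldl
        (fun (st : List (List (String × String)) × String) event =>
          let cur := match (PySem.Dict.mk event).get? attr with
                     | some v => v
                     | none => st.2
          (st.1 ++ [((PySem.Dict.mk event).insert key cur).items], cur))
        ([], "NotAssigned")).1)

-- ===== PRECONDITION & SPEC =====
-- Pre_ excludes logs in which some event already carries the output key 'Cur'+attr+'Value(D2)':
-- there A's result depends on its own in-place mutation (a later event can dict-equal an earlier,
-- already-annotated event and shadow the scan), an accidental corner for a key A reserves for its output.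
def Pre_add_D2 (log : List (List (List (String × String)))) (attr : String) : Prop :=
  ∀ tr_ ∈ log, ∀ event ∈ tr_,
    (PySem.Dict.mk event).get? ("Cur" ++ attr ++ "Value(D2)") = none
instance (log : List (List (List (String × String)))) (attr : String) :
    Decidable (Pre_add_D2 log attr) := by unfold Pre_add_D2; infer_instance

def pvWitness_add_D2 : (List (List (List (String × String)))) × String :=
  ([[[("a", "v")], [("x", "1")]]], "a")

def Spec_add_D2 (log : List (List (List (String × String)))) (attr : String)
    (out : List (List (List (String × String)))) : Prop := out = add_D2_alt log attr
instance (log : List (List (List (String × String)))) (attr : String)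
    (out : List (List (List (String × String)))) : Decidable (Spec_add_D2 log attr out) := by
  unfold Spec_add_D2; infer_instance

-- ===== CLAIM (what is proved, stated in full; the proofs are below) =====
def Claim_equal_add_D2 : Prop := ∀ (log : List (List (List (String × String)))) (attr : String), Dom_add_D2 log attr → Pre_add_D2 log attr → Spec_add_D2 log attr (add_D2 log attr)

-- ===== LEMMAS AND PROOFS =====

-- the running-value step both programs take per event
def stepA (attr : String) (av : String) (e : List (String × String)) : String :=
  match (PySem.Dict.mk e).get? attr with
  | some v => v
  | none => av

lemma key_ne_attr (attr : String) : ("Cur" ++ attr ++ "Value(D2)") ≠ attr := by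
  intro h
  have h' := congrArg String.length h
  simp only [String.length_append] at h'
  have c3 : ("Cur" : String).length = 3 := rfl
  have c9 : ("Value(D2)" : String).length = 9 := rfl
  omega

lemma pyDictEq_refl (d : List (String × String)) : pyDictEq d d = true := by
  simp [pyDictEq]

lemma pyDictEq_ne_of_key (K : String) (e event : List (String × String))
    (he : (PySem.Dict.mk e).get? K ≠ none)
    (hev : (PySem.Dict.mk event).get? K = none) : pyDictEq e event = false := by
  unfold pyDictEq
  have hmem : K ∈ (PySem.Dict.mk e).keys := by
    by_contra hK
    exact he ((PySem.Dict.get?_eq_none_iff_not_mem_keys _ _).2 hK)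
  apply Bool.and_eq_false_iff.2
  left
  apply List.all_eq_false.2
  refine ⟨K, hmem, ?_⟩
  cases hge : (PySem.Dict.mk e).get? K with
  | none => exact absurd hge he
  | some v => simp [hev]

lemma curValueGo_scan (attr K : String) (event : List (String × String))
    (hev : (PySem.Dict.mk event).get? K = none)
    (hattr : (PySem.Dict.mk event).get? attr = none) :
    ∀ (pre : List (List (String × String))),
      (∀ e ∈ pre, (PySem.Dict.mk e).get? K ≠ none) →
      ∀ (rest : List (List (String × String))) (av : String),
        curValueGo attr event (pre ++ event :: rest) av true = pre.foldl (stepA attr) av := by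
  intro pre
  induction pre with
  | nil =>
      intro _ rest av
      simp [curValueGo, hattr, pyDictEq_refl]
  | cons e pre ih =>
      intro hpre rest av
      have hne : pyDictEq e event = false :=
        pyDictEq_ne_of_key K e event (hpre e (by simp)) hev
      have h1 : curValueGo attr event ((e :: pre) ++ event :: rest) av true
          = curValueGo attr event (pre ++ event :: rest) (stepA attr av e) true := by
        simp [curValueGo, hne, stepA]
      rw [h1, ih (fun e' he' => hpre e' (by simp [he'])) rest, List.foldl_cons]

lemma addD2Tr_eq_fold (attr : String)
    (todo : List (List (String × String))) :
    ∀ (done : List (List (String × String))) (cur : String),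
      (∀ e ∈ todo, (PySem.Dict.mk e).get? ("Cur" ++ attr ++ "Value(D2)") = none) →
      (∀ e ∈ done, (PySem.Dict.mk e).get? ("Cur" ++ attr ++ "Value(D2)") ≠ none) →
      done.foldl (stepA attr) "NotAssigned" = cur →
      addD2Tr attr done todo =
        (todo.foldl
          (fun (st : List (List (String × String)) × String) event =>
            let cur := match (PySem.Dict.mk event).get? attr with
                       | some v => v
                       | none => st.2
            (st.1 ++ [((PySem.Dict.mk event).insert ("Cur" ++ attr ++ "Value(D2)") cur).items],
              cur))
          (done, cur)).1 := by
  induction todo with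
  | nil => intro done cur _ _ _; simp [addD2Tr]
  | cons event rest ih =>
      intro done cur htodo hdone hfold
      have hev : (PySem.Dict.mk event).get? ("Cur" ++ attr ++ "Value(D2)") = none := htodo event (by simp)
      have hv : (match (PySem.Dict.mk event).get? attr with
                 | some w => w
                 | none => curValue (done ++ event :: rest) event attr) = stepA attr cur event := by
        cases hga : (PySem.Dict.mk event).get? attr with
        | some w => simp [stepA, hga]
        | none =>
            simp only [stepA, hga]
            unfold curValue
            rw [curValueGo_scan attr ("Cur" ++ attr ++ "Value(D2)") event hev hga done hdone rest "NotAssigned", hfold]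
      have hstep : addD2Tr attr done (event :: rest) = addD2Tr attr
          (done ++ [((PySem.Dict.mk event).insert ("Cur" ++ attr ++ "Value(D2)") (stepA attr cur event)).items]) rest := by
        simp only [addD2Tr]
        rw [hv]
      rw [hstep]
      have hget_e' : ∀ v : String, (PySem.Dict.mk (((PySem.Dict.mk event).insert ("Cur" ++ attr ++ "Value(D2)") v).items)).get? ("Cur" ++ attr ++ "Value(D2)") = some v :=
        fun v => PySem.Dict.get?_insert_self _ _ _
      have hattr_e' : ∀ v : String, (PySem.Dict.mk (((PySem.Dict.mk event).insert ("Cur" ++ attr ++ "Value(D2)") v).items)).get? attr = (PySem.Dict.mk event).get? attr :=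
        fun v => PySem.Dict.get?_insert_of_ne _ _ (fun h => key_ne_attr attr h.symm)
      rw [ih (done ++ [((PySem.Dict.mk event).insert ("Cur" ++ attr ++ "Value(D2)") (stepA attr cur event)).items]) (stepA attr cur event)
            (fun e he => htodo e (by simp [he]))
            (by
              intro e he
              rcases List.mem_append.1 he with h | h
              · exact hdone e h
              · have he2 : e = ((PySem.Dict.mk event).insert ("Cur" ++ attr ++ "Value(D2)") (stepA attr cur event)).items := by simpa using h
                rw [he2, hget_e']
                simp)
            (by
              rw [List.foldl_append, hfold]
              simp only [List.foldl_cons, List.foldl_nil, stepA]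
              rw [hattr_e'])]
      simp only [List.foldl_cons]
      rfl

-- ===== VERDICT (by name: the statement is the Claim_ definition above) =====
theorem add_D2_spec : Claim_equal_add_D2 := by
  intro log attr _ hpre
  unfold Spec_add_D2 add_D2 add_D2_alt
  apply List.map_congr_left
  intro tr_ htr_
  rw [addD2Tr_eq_fold attr tr_ [] "NotAssigned" (hpre tr_ htr_) (by simp) rfl]
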